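-- pv_equiv track=rewrite | github.com/Kim-Jeong-Ju/Algorithm_Python | 057_magician_shark.py | after_move
-- ===== SOURCE A (Python) =====
-- def after_move(now_cloud, command, N):
--     direct, size = command[0], command[1]
--
--     if direct == 1:         # 왼쪽 : y만 감소
--         for a, [cloud_x, cloud_y] in enumerate(now_cloud):
--             cloud_y -= size
--             if cloud_y < 0:
--                 cloud_y += N * ((abs(cloud_y) // N) + 1)
--                 if cloud_y % N == 0: cloud_y = 0
--             else: pass
--             now_cloud[a] = [cloud_x, cloud_y]
--     elif direct == 2:       # 왼쪽 위 대각선 : x&y 모두 감소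
--         for b, [cloud_x, cloud_y] in enumerate(now_cloud):
--             cloud_x -= size
--             cloud_y -= size
--             if cloud_x < 0:
--                 cloud_x += (N * ((abs(cloud_x) // N) + 1))
--                 if cloud_x % N == 0: cloud_x = 0
--             else: pass
--             if cloud_y < 0:
--                 cloud_y += N * ((abs(cloud_y) // N) + 1)
--                 if cloud_y % N == 0: cloud_y = 0
--             else: pass
--             now_cloud[b] = [cloud_x, cloud_y]
--     elif direct == 3:       # 위 : x만 감소
--         for c, [cloud_x, cloud_y] in enumerate(now_cloud):
--             cloud_x -= size
--             if cloud_x < 0: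
--                 cloud_x += (N * ((abs(cloud_x) // N) + 1))
--                 if cloud_x % N == 0: cloud_x = 0
--             else: pass
--             now_cloud[c] = [cloud_x, cloud_y]
--     elif direct == 4:       # 오른쪽 위 대각선 : x 감소 y 증가
--         for d, [cloud_x, cloud_y] in enumerate(now_cloud):
--             cloud_x -= size
--             cloud_y += size
--             if cloud_x < 0:
--                 cloud_x += (N * ((abs(cloud_x) // N) + 1))
--                 if cloud_x % N == 0: cloud_x = 0
--             else: pass
--             if cloud_y >= N: cloud_y = cloud_y % N
--             else: pass
--             now_cloud[d] = [cloud_x, cloud_y]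
--     elif direct == 5:       # 오른쪽 : y만 증가
--         for e, [cloud_x, cloud_y] in enumerate(now_cloud):
--             cloud_y += size
--             if cloud_y >= N: cloud_y = cloud_y % N
--             else: pass
--             now_cloud[e] = [cloud_x, cloud_y]
--     elif direct == 6:       # 오른쪽 아래 대각선 : x&y 모두 증가
--         for f, [cloud_x, cloud_y] in enumerate(now_cloud):
--             cloud_x += size
--             cloud_y += size
--             if cloud_x >= N: cloud_x = cloud_x % N
--             else: pass
--             if cloud_y >= N: cloud_y = cloud_y % N
--             else: pass
--             now_cloud[f] = [cloud_x, cloud_y]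
--     elif direct == 7:       # 아래 : x만 증가
--         for g, [cloud_x, cloud_y] in enumerate(now_cloud):
--             cloud_x += size
--             if cloud_x >= N: cloud_x = cloud_x % N
--             else: pass
--             now_cloud[g] = [cloud_x, cloud_y]
--     else:                   # 왼쪽 아래 대각선 : x 증가 y 감소
--         for h, [cloud_x, cloud_y] in enumerate(now_cloud):
--             cloud_x += size
--             cloud_y -= size
--             if cloud_x >= N: cloud_x = cloud_x % N
--             else: pass
--             if cloud_y < 0:
--                 cloud_y += N * ((abs(cloud_y) // N) + 1)
--                 if cloud_y % N == 0: cloud_y = 0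
--             else: pass
--             now_cloud[h] = [cloud_x, cloud_y]
--
--     return now_cloud
-- ===== SOURCE B (Python) =====
-- # B: classify the direction into independent per-axis move modes, then
-- # transform the x-column and the y-column separately as whole lists and zip
-- # the columns back into rows (staged column-wise passes instead of A's eight
-- # branchy row-wise loops). Like A, mutates now_cloud in place and returns it.
--
-- def _shift_col(col, mode, size, N):
--     # mode '-': the axis decreases; wrap (Python %) only when the result is
--     # negative.  mode '+': increases; wrap only when the result reaches N.
--     if mode == '-':
--         return [v - size if v - size >= 0 else (v - size) % N for v in col]
--     if mode == '+':
--         return [v + size if v + size < N else (v + size) % N for v in col]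
--     return list(col)
--
-- def after_move(now_cloud, command, N):
--     direct, size = command[0], command[1]
--     xm = '-' if direct in (2, 3, 4) else (None if direct in (1, 5) else '+')
--     ym = '+' if direct in (4, 5, 6) else (None if direct in (3, 7) else '-')
--     xs = _shift_col([r[0] for r in now_cloud], xm, size, N)
--     ys = _shift_col([r[1] for r in now_cloud], ym, size, N)
--     now_cloud[:] = [[x, y] for x, y in zip(xs, ys)]
--     return now_cloud
-- ===== Notes on version B (the rewrite author's own statement) =====
-- stated objective: alternative
-- what changed: Replaced A's eight direction-specific row-wise loops by classifying the direction into independent per-axis move modes, transforming the x-column and the y-column separately as whole lists, and zipping the columns back into rows (staged column-wise passes instead of a branchy row-wise loop).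
-- outside the precondition, e.g. on after_move([[-5, -5]], [6, 1], 0): A returns [[-4, -4]], B returns [[-4, -4]]
import Mathlib
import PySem

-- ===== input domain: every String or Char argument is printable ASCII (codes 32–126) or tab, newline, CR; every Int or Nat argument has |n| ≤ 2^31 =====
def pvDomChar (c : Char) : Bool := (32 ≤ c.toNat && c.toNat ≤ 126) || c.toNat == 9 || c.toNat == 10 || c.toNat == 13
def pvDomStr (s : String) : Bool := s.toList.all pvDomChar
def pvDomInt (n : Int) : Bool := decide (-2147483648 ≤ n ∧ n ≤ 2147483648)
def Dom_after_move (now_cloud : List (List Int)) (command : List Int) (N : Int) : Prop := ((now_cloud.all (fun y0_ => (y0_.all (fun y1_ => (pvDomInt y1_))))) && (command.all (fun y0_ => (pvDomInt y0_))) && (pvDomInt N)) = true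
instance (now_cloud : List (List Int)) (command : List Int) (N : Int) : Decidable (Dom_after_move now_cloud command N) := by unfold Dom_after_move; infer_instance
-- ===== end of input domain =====

-- B replaces A's eight direction-specific row loops by per-axis move modes and
-- two staged column-wise passes zipped back into rows (alternative, same cost).
-- In Python both A and B mutate now_cloud in place and return it; the
-- equivalence proved here is about the return value.

-- ===== PORT A =====
-- A's wrap block for a decreased coordinate (repeated verbatim in its branches):
--   if v < 0: v += N*((abs(v)//N)+1); if v % N == 0: v = 0
def pvDecA (v N : Int) : Int :=
  if v < 0 then
    if PySem.Int.mod (v + N * (PySem.Int.floordiv |v| N + 1)) N = 0 then 0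
    else v + N * (PySem.Int.floordiv |v| N + 1)
  else v

-- A's wrap block for an increased coordinate: if v >= N: v = v % N
def pvIncA (v N : Int) : Int :=
  if v ≥ N then PySem.Int.mod v N else v

-- rows that are not two-element lists raise ValueError in Python on unpacking
-- (excluded by Pre_); the `| _ => r` arm totalises that
def pvRowA (f : Int → Int → List Int) (r : List Int) : List Int :=
  match r with | [x, y] => f x y | _ => r

def after_move (now_cloud : List (List Int)) (command : List Int) (N : Int) : List (List Int) :=
  let direct := PySem.List.pyGetD command 0 0   -- command[0]; IndexError excluded by Pre_
  let size := PySem.List.pyGetD command 1 0     -- command[1]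
  if direct = 1 then
    now_cloud.map (pvRowA (fun x y => [x, pvDecA (y - size) N]))
  else if direct = 2 then
    now_cloud.map (pvRowA (fun x y => [pvDecA (x - size) N, pvDecA (y - size) N]))
  else if direct = 3 then
    now_cloud.map (pvRowA (fun x y => [pvDecA (x - size) N, y]))
  else if direct = 4 then
    now_cloud.map (pvRowA (fun x y => [pvDecA (x - size) N, pvIncA (y + size) N]))
  else if direct = 5 then
    now_cloud.map (pvRowA (fun x y => [x, pvIncA (y + size) N]))
  else if direct = 6 then
    now_cloud.map (pvRowA (fun x y => [pvIncA (x + size) N, pvIncA (y + size) N]))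
  else if direct = 7 then
    now_cloud.map (pvRowA (fun x y => [pvIncA (x + size) N, y]))
  else
    now_cloud.map (pvRowA (fun x y => [pvIncA (x + size) N, pvDecA (y - size) N]))

-- ===== PORT B =====
-- B's per-axis move mode: '-', '+', or None in Source B
inductive PvMode
  | minus
  | plus
  | keep
deriving DecidableEq, Repr

-- Source B's _shift_col: transform one whole coordinate column
def pvShiftCol (col : List Int) (mode : PvMode) (size N : Int) : List Int :=
  match mode with
  | .minus => col.map (fun v => if v - size ≥ 0 then v - size else PySem.Int.mod (v - size) N)
  | .plus  => col.map (fun v => if v + size < N then v + size else PySem.Int.mod (v + size) N)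
  | .keep  => col

def after_move_alt (now_cloud : List (List Int)) (command : List Int) (N : Int) : List (List Int) :=
  let direct := PySem.List.pyGetD command 0 0
  let size := PySem.List.pyGetD command 1 0
  let xm : PvMode := if direct = 2 ∨ direct = 3 ∨ direct = 4 then .minus
    else if direct = 1 ∨ direct = 5 then .keep else .plus
  let ym : PvMode := if direct = 4 ∨ direct = 5 ∨ direct = 6 then .plus
    else if direct = 3 ∨ direct = 7 then .keep else .minus
  -- [r[0] for r in now_cloud] / [r[1] for r in now_cloud]; short rows raise in
  -- Python (excluded by Pre_), pyGetD totalises that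
  let xs := pvShiftCol (now_cloud.map (fun r => PySem.List.pyGetD r 0 0)) xm size N
  let ys := pvShiftCol (now_cloud.map (fun r => PySem.List.pyGetD r 1 0)) ym size N
  List.zipWith (fun x y => [x, y]) xs ys

-- ===== PRECONDITION & SPEC =====
-- Pre_ excludes exactly the raising inputs: command shorter than 2 (IndexError),
-- a row that is not a 2-element list (ValueError on unpacking), and N = 0 (on
-- which A raises ZeroDivisionError whenever any wrap branch fires; the few
-- N = 0 inputs on which no branch fires are excluded too, and there A and B
-- return the same value).
def Pre_after_move (now_cloud : List (List Int)) (command : List Int) (N : Int) : Prop :=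
  2 ≤ command.length ∧ N ≠ 0 ∧ ∀ r ∈ now_cloud, r.length = 2
instance (now_cloud : List (List Int)) (command : List Int) (N : Int) : Decidable (Pre_after_move now_cloud command N) := by unfold Pre_after_move; infer_instance

def pvWitness_after_move : List (List Int) × List Int × Int := ([[0, 1], [4, 2]], [2, 3], 5)

def Spec_after_move (now_cloud : List (List Int)) (command : List Int) (N : Int) (out : List (List Int)) : Prop := out = after_move_alt now_cloud command N
instance (now_cloud : List (List Int)) (command : List Int) (N : Int) (out : List (List Int)) : Decidable (Spec_after_move now_cloud command N out) := by unfold Spec_after_move; infer_instance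

-- ===== CLAIM (what is proved, stated in full; the proofs are below) =====
def Claim_equal_after_move : Prop := ∀ (now_cloud : List (List Int)) (command : List Int) (N : Int), Dom_after_move now_cloud command N → Pre_after_move now_cloud command N → Spec_after_move now_cloud command N (after_move now_cloud command N)

-- ===== LEMMAS AND PROOFS =====

-- uniqueness of the Python remainder: anything congruent to a that lies in the
-- divisor's half-open interval IS mod a N
theorem pvMod_unique (a N t : Int) (hN : N ≠ 0)
    (hb : (0 < N ∧ 0 ≤ t ∧ t < N) ∨ (N < 0 ∧ N < t ∧ t ≤ 0))
    (hd : N ∣ a - t) : PySem.Int.mod a N = t := by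
  have h4 := PySem.Int.floordiv_mul_add_mod a N
  obtain ⟨k, hk⟩ := hd
  set m := PySem.Int.mod a N with hm
  set f := PySem.Int.floordiv a N with hf
  have hdiff : m - t = N * (k - f) := by linear_combination hk + h4
  have hmb : (0 < N ∧ 0 ≤ m ∧ m < N) ∨ (N < 0 ∧ N < m ∧ m ≤ 0) := by
    rcases lt_or_gt_of_ne hN with h | h
    · exact Or.inr ⟨h, (PySem.Int.mod_neg_bounds a h).1, (PySem.Int.mod_neg_bounds a h).2⟩
    · exact Or.inl ⟨h, PySem.Int.mod_nonneg a h, PySem.Int.mod_lt a h⟩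
  have habs : |N * (k - f)| < |N| := by
    rw [← hdiff, abs_lt]
    rcases hb with ⟨h, h1, h2⟩ | ⟨h, h1, h2⟩
    · rcases hmb with ⟨g, g1, g2⟩ | ⟨g, g1, g2⟩
      · rw [abs_of_pos h]; constructor <;> linarith
      · linarith
    · rcases hmb with ⟨g, g1, g2⟩ | ⟨g, g1, g2⟩
      · linarith
      · rw [abs_of_neg h]; constructor <;> linarith
  rw [abs_mul] at habs
  have hk0 : |k - f| < 1 :=
    lt_of_mul_lt_mul_left (by simpa using habs) (abs_nonneg N)
  have hz : k - f = 0 := by rw [abs_lt] at hk0; omega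
  rw [hz, mul_zero] at hdiff
  linarith

-- A's negative-wrap block computes exactly Python's v % N (for v < 0, N ≠ 0)
theorem pvDecA_eq_mod (v N : Int) (hv : v < 0) (hN : N ≠ 0) :
    pvDecA v N = PySem.Int.mod v N := by
  unfold pvDecA
  rw [if_pos hv]
  rw [abs_of_neg hv]
  have hQ := PySem.Int.floordiv_mul_add_mod (-v) N
  set q := PySem.Int.floordiv (-v) N with hq
  set r := PySem.Int.mod (-v) N with hr
  rw [show v + N * (q + 1) = N - r from by linarith]
  by_cases hz : PySem.Int.mod (N - r) N = 0
  · rw [if_pos hz]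
    have hdr : N ∣ N - r := (PySem.Int.mod_eq_zero_iff_dvd _ _).mp hz
    obtain ⟨c, hc⟩ := hdr
    have hdv : N ∣ v := ⟨-(q + 1 - c), by linarith⟩
    exact ((PySem.Int.mod_eq_zero_iff_dvd v N).mpr hdv).symm
  · rw [if_neg hz]
    have hrne : r ≠ 0 := by
      intro h
      exact hz (by rw [h, sub_zero]; exact (PySem.Int.mod_eq_zero_iff_dvd N N).mpr dvd_rfl)
    refine (pvMod_unique v N (N - r) hN ?_ ⟨-(q + 1), by linarith⟩).symm
    rcases lt_or_gt_of_ne hN with h | h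
    · have hb := PySem.Int.mod_neg_bounds (-v) h
      exact Or.inr ⟨h, by omega, by omega⟩
    · have h0 := PySem.Int.mod_nonneg (-v) h
      have h1 := PySem.Int.mod_lt (-v) h
      exact Or.inl ⟨h, by omega, by omega⟩

-- B's '-' column entry equals A's decreased-axis transform
theorem pvShiftCol_minus (col : List Int) (s N : Int) (hN : N ≠ 0) :
    pvShiftCol col .minus s N = col.map (fun v => pvDecA (v - s) N) := by
  unfold pvShiftCol
  apply List.map_congr_left
  intro v _
  by_cases h : v - s < 0
  · rw [if_neg (by omega), pvDecA_eq_mod _ _ h hN]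
  · rw [if_pos (by omega)]
    unfold pvDecA
    rw [if_neg h]

-- B's '+' column entry equals A's increased-axis transform
theorem pvShiftCol_plus (col : List Int) (s N : Int) :
    pvShiftCol col .plus s N = col.map (fun v => pvIncA (v + s) N) := by
  unfold pvShiftCol pvIncA
  apply List.map_congr_left
  intro v _
  by_cases h : v + s < N
  · rw [if_pos h, if_neg (by omega)]
  · rw [if_neg h, if_pos (by omega)]

-- row-wise map over 2-element rows = zip of the two mapped columns
theorem pvColZip (gx gy : Int → Int) :
    ∀ (nc : List (List Int)), (∀ r ∈ nc, r.length = 2) →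
    nc.map (pvRowA (fun x y => [gx x, gy y])) =
    List.zipWith (fun x y => [x, y])
      ((nc.map (fun r => PySem.List.pyGetD r 0 0)).map gx)
      ((nc.map (fun r => PySem.List.pyGetD r 1 0)).map gy) := by
  intro nc
  induction nc with
  | nil => intro _; rfl
  | cons r t ih =>
    intro h
    have h2 := h r (List.mem_cons_self ..)
    match r, h2 with
    | [x, y], _ =>
      simp only [List.map_cons, List.zipWith_cons_cons]
      rw [ih (fun r hr => h r (List.mem_cons_of_mem _ hr))]
      rfl

-- ===== VERDICT (by name: the statement is the Claim_ definition above) =====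
theorem after_move_spec : Claim_equal_after_move := by
  intro nc cmd N _ hpre
  obtain ⟨hlen, hN, hrows⟩ := hpre
  unfold Spec_after_move after_move after_move_alt
  obtain ⟨d, s, rest, rfl⟩ : ∃ d s rest, cmd = d :: s :: rest := by
    match cmd, hlen with
    | d :: s :: rest, _ => exact ⟨d, s, rest, rfl⟩
  rw [PySem.List.pyGetD_zero_cons]
  rw [show PySem.List.pyGetD (d :: s :: rest) 1 0 = s from by simp [PySem.List.pyGetD]]
  dsimp only
  by_cases h1 : d = 1
  · subst h1
    rw [if_pos rfl, if_neg (by norm_num), if_pos (by norm_num), if_neg (by norm_num),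
      if_neg (by norm_num)]
    rw [show pvShiftCol (nc.map (fun r => PySem.List.pyGetD r 0 0)) .keep s N
        = (nc.map (fun r => PySem.List.pyGetD r 0 0)).map id from by
      simp [pvShiftCol]]
    rw [pvShiftCol_minus _ s N hN]
    exact pvColZip id (fun v => pvDecA (v - s) N) nc hrows
  rw [if_neg h1]
  by_cases h2 : d = 2
  · subst h2
    rw [if_pos rfl, if_pos (by norm_num), if_neg (by norm_num), if_neg (by norm_num)]
    rw [pvShiftCol_minus _ s N hN, pvShiftCol_minus _ s N hN]
    exact pvColZip (fun v => pvDecA (v - s) N) (fun v => pvDecA (v - s) N) nc hrows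
  rw [if_neg h2]
  by_cases h3 : d = 3
  · subst h3
    rw [if_pos rfl, if_pos (by norm_num), if_neg (by norm_num), if_pos (by norm_num)]
    rw [pvShiftCol_minus _ s N hN]
    rw [show pvShiftCol (nc.map (fun r => PySem.List.pyGetD r 1 0)) .keep s N
        = (nc.map (fun r => PySem.List.pyGetD r 1 0)).map id from by
      simp [pvShiftCol]]
    exact pvColZip (fun v => pvDecA (v - s) N) id nc hrows
  rw [if_neg h3]
  by_cases h4 : d = 4
  · subst h4
    rw [if_pos rfl, if_pos (by norm_num), if_pos (by norm_num)]
    rw [pvShiftCol_minus _ s N hN, pvShiftCol_plus]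
    exact pvColZip (fun v => pvDecA (v - s) N) (fun v => pvIncA (v + s) N) nc hrows
  rw [if_neg h4]
  by_cases h5 : d = 5
  · subst h5
    rw [if_pos rfl, if_neg (by norm_num), if_pos (by norm_num), if_pos (by norm_num)]
    rw [show pvShiftCol (nc.map (fun r => PySem.List.pyGetD r 0 0)) .keep s N
        = (nc.map (fun r => PySem.List.pyGetD r 0 0)).map id from by
      simp [pvShiftCol]]
    rw [pvShiftCol_plus]
    exact pvColZip id (fun v => pvIncA (v + s) N) nc hrows
  rw [if_neg h5]
  by_cases h6 : d = 6
  · subst h6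
    rw [if_pos rfl, if_neg (by norm_num), if_neg (by norm_num), if_pos (by norm_num)]
    rw [pvShiftCol_plus, pvShiftCol_plus]
    exact pvColZip (fun v => pvIncA (v + s) N) (fun v => pvIncA (v + s) N) nc hrows
  rw [if_neg h6]
  by_cases h7 : d = 7
  · subst h7
    rw [if_pos rfl, if_neg (by norm_num), if_neg (by norm_num), if_neg (by norm_num),
      if_pos (by norm_num)]
    rw [pvShiftCol_plus]
    rw [show pvShiftCol (nc.map (fun r => PySem.List.pyGetD r 1 0)) .keep s N
        = (nc.map (fun r => PySem.List.pyGetD r 1 0)).map id from by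
      simp [pvShiftCol]]
    exact pvColZip (fun v => pvIncA (v + s) N) id nc hrows
  rw [if_neg h7]
  rw [if_neg (by tauto), if_neg (by tauto), if_neg (by tauto), if_neg (by tauto)]
  rw [pvShiftCol_plus, pvShiftCol_minus _ s N hN]
  exact pvColZip (fun v => pvIncA (v + s) N) (fun v => pvDecA (v - s) N) nc hrows
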